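-- pv_equiv track=rewrite | github.com/world-dv/HackerRank_CodingTest | python/Greedy/Priyanka and Toys.py | toys
-- ===== SOURCE A (Python) =====
-- def toys(w):
--     w = sorted(w)
--     answer = 1
--     idx = 0
--     limit = w[idx]
--     while idx < len(w):
--         if w[idx] > limit + 4:
--             answer += 1
--             limit = w[idx]
--         idx += 1
--     return answer
-- ===== SOURCE B (Python) =====
-- def toys(w):
--     s = sorted(w)
--     n = len(s)
--     answer = 0
--     i = 0
--     while i < n:
--         answer += 1
--         limit = s[i] + 4
--         lo, hi = i + 1, n
--         while lo < hi:
--             mid = (lo + hi) // 2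
--             if s[mid] <= limit:
--                 lo = mid + 1
--             else:
--                 hi = mid
--         i = lo
--     return answer
-- ===== Notes on version B (the rewrite author's own statement) =====
-- stated objective: alternative
-- what changed: Replaces A's flat per-element scan after sorting with an index-jumping loop that binary-searches (hand-rolled bisect_right) for the first weight past each container's limit.
-- crash fix: On the empty list A raises IndexError reading w[0]; B returns 0, the natural container count. — e.g. on toys([]): A raises IndexError, B returns 0
import Mathlib
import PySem

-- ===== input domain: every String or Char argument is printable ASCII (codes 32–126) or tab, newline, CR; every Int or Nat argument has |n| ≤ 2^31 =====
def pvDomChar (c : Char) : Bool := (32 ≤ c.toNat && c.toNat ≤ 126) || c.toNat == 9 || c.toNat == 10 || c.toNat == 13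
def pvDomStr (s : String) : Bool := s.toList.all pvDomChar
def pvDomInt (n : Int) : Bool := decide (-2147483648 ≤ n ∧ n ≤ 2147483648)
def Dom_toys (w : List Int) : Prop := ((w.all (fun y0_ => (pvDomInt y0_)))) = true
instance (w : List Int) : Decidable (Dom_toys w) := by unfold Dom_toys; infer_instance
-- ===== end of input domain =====

-- B replaces A's flat per-element scan with an index-jumping loop that binary-searches
-- (hand-rolled bisect_right) past each container's weight range; return-value equivalence only.

-- ===== PORT A =====
-- 'answer = 1; limit = w[0]; while idx < len(w): …' — the index scan visits every element
-- in order, so it is ported as a foldl over the sorted list with state (answer, limit).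
def toys (w : List Int) : Int :=
  ((PySem.List.sorted w (fun x => x) false).foldl
      (fun (st : Int × Int) x => if x > st.2 + 4 then (st.1 + 1, x) else st)
      ((1 : Int), PySem.List.pyGetD (PySem.List.sorted w (fun x => x) false) 0 0)).1
      -- w[0]: IndexError on the empty list, excluded by Pre_

-- ===== PORT B =====
-- inner 'while lo < hi' binary search of Source B, step for step; the fuel argument is a pure
-- totality guard (hi - lo bounds the iteration count, mid = (lo+hi)//2 inlined)
def toysBisectGo (s : List Int) (limit : Int) : Nat → Nat → Nat → Nat
  | 0, lo, _ => lo
  | fuel + 1, lo, hi =>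
    if lo < hi then
      if PySem.List.pyGetD s (((lo + hi) / 2 : Nat) : Int) 0 ≤ limit then
        toysBisectGo s limit fuel ((lo + hi) / 2 + 1) hi
      else toysBisectGo s limit fuel lo ((lo + hi) / 2)
    else lo

def toysBisect (s : List Int) (limit : Int) (lo hi : Nat) : Nat :=
  toysBisectGo s limit (hi - lo) lo hi

-- outer 'while i < n' loop of Source B; fuel (= number of elements left) is a totality guard,
-- each jump moves i forward by at least one
def toysJumpGo (s : List Int) : Nat → Nat → Int → Int
  | 0, _, answer => answer
  | fuel + 1, i, answer =>
    if i < s.length then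
      toysJumpGo s fuel (toysBisect s (PySem.List.pyGetD s (i : Int) 0 + 4) (i + 1) s.length)
        (answer + 1)
    else answer

def toys_alt (w : List Int) : Int :=
  toysJumpGo (PySem.List.sorted w (fun x => x) false)
    (PySem.List.sorted w (fun x => x) false).length 0 0

-- ===== PRECONDITION & SPEC =====
-- Pre_ excludes only the empty list, on which A raises IndexError at w[0].
def Pre_toys (w : List Int) : Prop := w ≠ []
instance (w : List Int) : Decidable (Pre_toys w) := by unfold Pre_toys; infer_instance
def pvWitness_toys : List Int := [1, 7, 3, 12]

-- On the empty list A raises IndexError (it reads w[0]); B returns zero, the natural count.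
def Raises_toys (w : List Int) : Prop := w = []
instance (w : List Int) : Decidable (Raises_toys w) := by unfold Raises_toys; infer_instance
def pvRaiseWitness_toys : List Int := []
def pvRaiseWitnessOut_toys : Int := 0

def Spec_toys (w : List Int) (out : Int) : Prop := out = toys_alt w
instance (w : List Int) (out : Int) : Decidable (Spec_toys w out) := by unfold Spec_toys; infer_instance

-- ===== CLAIM (what is proved, stated in full; the proofs are below) =====
def Claim_equal_toys : Prop := ∀ (w : List Int), Dom_toys w → Pre_toys w → Spec_toys w (toys w)
def Claim_raises_toys : Prop := (∀ (w : List Int), Dom_toys w → Raises_toys w → ¬ Pre_toys w) ∧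
  (Dom_toys (pvRaiseWitness_toys) ∧ Raises_toys (pvRaiseWitness_toys) ∧
    toys_alt (pvRaiseWitness_toys) = pvRaiseWitnessOut_toys)

-- ===== LEMMAS AND PROOFS =====

theorem pyGetD_nat (s : List Int) (k : Nat) (hk : k < s.length) :
    PySem.List.pyGetD s (k : Int) 0 = s[k] := by
  rw [PySem.List.pyGetD_natCast]
  simp [List.getD_eq_getElem?_getD, hk]

-- A's scan, abstracted: count of new containers over the tail, given the current limit
def cnt : List Int → Int → Int
  | [], _ => 0
  | y :: ys, lim => if y > lim + 4 then 1 + cnt ys y else cnt ys lim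

theorem foldl_cnt (ys : List Int) (a lim : Int) :
    (ys.foldl (fun (st : Int × Int) x =>
      if x > st.2 + 4 then (st.1 + 1, x) else st) (a, lim)).1 = a + cnt ys lim := by
  induction ys generalizing a lim with
  | nil => simp [cnt]
  | cons y ys ih =>
    simp only [List.foldl_cons, cnt]
    by_cases h : y > lim + 4
    · simp only [if_pos h, ih]; ring
    · simp only [if_neg h, ih]

theorem cnt_of_all_le (s : List Int) (lim : Int) (i : Nat) :
    ∀ j, i ≤ j → j ≤ s.length →
      (∀ k, i ≤ k → k < j → ∀ hk : k < s.length, s[k] ≤ lim + 4) →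
      cnt (s.drop i) lim = cnt (s.drop j) lim := by
  intro j hij
  induction j, hij using Nat.le_induction with
  | base => intro _ _; rfl
  | succ m hm ih =>
    intro hj hle
    have hmlen : m < s.length := by omega
    have prev : cnt (s.drop i) lim = cnt (s.drop m) lim :=
      ih (by omega) (fun k hk1 hk2 hk3 => hle k hk1 (by omega) hk3)
    rw [prev, List.drop_eq_getElem_cons hmlen]
    simp only [cnt]
    rw [if_neg (by have := hle m hm (by omega) hmlen; omega)]

theorem toysBisectGo_spec (s : List Int) (limit : Int)
    (hsorted : s.Pairwise (· ≤ ·)) :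
    ∀ fuel lo hi, hi - lo ≤ fuel → hi ≤ s.length → lo ≤ hi →
    lo ≤ toysBisectGo s limit fuel lo hi ∧ toysBisectGo s limit fuel lo hi ≤ hi ∧
    (∀ k, lo ≤ k → k < toysBisectGo s limit fuel lo hi → ∀ hk : k < s.length, s[k] ≤ limit) ∧
    (toysBisectGo s limit fuel lo hi < hi →
      ∀ hj : toysBisectGo s limit fuel lo hi < s.length,
        limit < s[toysBisectGo s limit fuel lo hi]) := by
  have hpw : ∀ a b : Nat, a ≤ b → ∀ hb : b < s.length, ∀ ha : a < s.length, s[a] ≤ s[b] := by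
    intro a b hab hb ha
    rcases Nat.eq_or_lt_of_le hab with h | h
    · subst h; exact le_refl _
    · exact (List.pairwise_iff_getElem.mp hsorted) a b ha hb h
  intro fuel
  induction fuel with
  | zero =>
    intro lo hi hfuel hhi hlh
    have : lo = hi := by omega
    subst this
    simp only [toysBisectGo]
    exact ⟨le_refl _, le_refl _, by omega, by omega⟩
  | succ fuel ih =>
    intro lo hi hfuel hhi hlh
    simp only [toysBisectGo]
    split
    · rename_i hlt
      have hmid : (lo + hi) / 2 < s.length := by omega
      simp only [pyGetD_nat s ((lo + hi) / 2) hmid]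
      split
      · rename_i hle
        have h2 := ih ((lo + hi) / 2 + 1) hi (by omega) hhi (by omega)
        refine ⟨by omega, h2.2.1, ?_, h2.2.2.2⟩
        intro k hk1 hk2 hk3
        by_cases hk4 : (lo + hi) / 2 + 1 ≤ k
        · exact h2.2.2.1 k hk4 hk2 hk3
        · exact le_trans (hpw k ((lo + hi) / 2) (by omega) hmid (by omega)) hle
      · rename_i hgt
        have h2 := ih lo ((lo + hi) / 2) (by omega) (by omega) (by omega)
        refine ⟨h2.1, by omega, h2.2.2.1, ?_⟩
        intro hlt2 hj
        by_cases hend : toysBisectGo s limit fuel lo ((lo + hi) / 2) < (lo + hi) / 2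
        · exact h2.2.2.2 hend hj
        · have he : toysBisectGo s limit fuel lo ((lo + hi) / 2) = (lo + hi) / 2 := by
            have := h2.2.1; omega
          simp only [he]
          omega
    · exact ⟨le_refl _, by omega, by omega, by omega⟩

theorem toysBisect_spec (s : List Int) (limit : Int) (lo hi : Nat)
    (hsorted : s.Pairwise (· ≤ ·)) (hhi : hi ≤ s.length) (hlh : lo ≤ hi) :
    lo ≤ toysBisect s limit lo hi ∧ toysBisect s limit lo hi ≤ hi ∧
    (∀ k, lo ≤ k → k < toysBisect s limit lo hi → ∀ hk : k < s.length, s[k] ≤ limit) ∧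
    (toysBisect s limit lo hi < hi →
      ∀ hj : toysBisect s limit lo hi < s.length, limit < s[toysBisect s limit lo hi]) :=
  toysBisectGo_spec s limit hsorted (hi - lo) lo hi (le_refl _) hhi hlh

theorem toysJumpGo_of_ge (s : List Int) (fuel i : Nat) (a : Int) (h : ¬ i < s.length) :
    toysJumpGo s fuel i a = a := by
  cases fuel with
  | zero => rfl
  | succ fuel => simp only [toysJumpGo, if_neg h]

theorem toysJumpGo_eq_cnt (s : List Int) (hsorted : s.Pairwise (· ≤ ·)) :
    ∀ fuel i a, ∀ hi : i < s.length, s.length - i ≤ fuel →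
      toysJumpGo s fuel i a = a + 1 + cnt (s.drop (i + 1)) s[i] := by
  intro fuel
  induction fuel with
  | zero => intro i a hi hfuel; omega
  | succ fuel ih =>
    intro i a hi hfuel
    simp only [toysJumpGo, if_pos hi, pyGetD_nat s i hi]
    set j := toysBisect s (s[i] + 4) (i + 1) s.length with hj
    have hspec := toysBisect_spec s (s[i] + 4) (i + 1) s.length hsorted (le_refl _) (by omega)
    rw [← hj] at hspec
    have hskip : cnt (s.drop (i + 1)) s[i] = cnt (s.drop j) s[i] :=
      cnt_of_all_le s (s[i]) (i + 1) j hspec.1 hspec.2.1 hspec.2.2.1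
    by_cases hjn : j < s.length
    · have hstep : cnt (s.drop j) s[i] = 1 + cnt (s.drop (j + 1)) (s[j]) := by
        rw [List.drop_eq_getElem_cons hjn]
        simp only [cnt]
        rw [if_pos (hspec.2.2.2 (by omega) hjn)]
      rw [ih j (a + 1) hjn (by omega), hskip, hstep]
      ring
    · rw [toysJumpGo_of_ge s fuel j (a + 1) hjn, hskip,
        show j = s.length by omega]
      simp [cnt]

theorem toys_eq (w : List Int) (hw : w ≠ []) : toys w = toys_alt w := by
  unfold toys toys_alt
  set s := PySem.List.sorted w (fun x => x) false with hs
  have hsorted : s.Pairwise (· ≤ ·) := by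
    have := PySem.List.sorted_pairwise w (fun x => x)
    simpa [← hs] using this
  have hslen : s.length = w.length := by
    rw [hs]; exact PySem.List.length_sorted w _ _
  have hpos : 0 < s.length := by
    rw [hslen]; exact List.length_pos_iff.mpr hw
  have hget0 : PySem.List.pyGetD s 0 0 = s[0] := by
    have h := pyGetD_nat s 0 hpos
    simpa using h
  rw [hget0]
  -- A side: peel the first element of the fold (s[0] > s[0] + 4 is false)
  obtain ⟨x, t, hst⟩ := List.exists_cons_of_ne_nil
    (l := s) (by intro h; rw [h] at hpos; simp at hpos)
  have hx : s[0] = x := by simp [hst]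
  rw [hx, hst]
  simp only [List.foldl_cons]
  rw [if_neg (by omega)]
  rw [foldl_cnt]
  -- B side
  have hB := toysJumpGo_eq_cnt s hsorted s.length 0 0 hpos (by omega)
  rw [hx] at hB
  rw [hst] at hB
  simpa using hB.symm

-- ===== VERDICT (by name: the statement is the Claim_ definition above) =====
theorem toys_spec : Claim_equal_toys := by
  intro w _ hpre
  unfold Spec_toys
  exact toys_eq w hpre

theorem toys_raises : Claim_raises_toys := by
  unfold Claim_raises_toys
  exact ⟨fun w _ hr => by unfold Raises_toys at hr; unfold Pre_toys; simp [hr], by decide⟩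

theorem toys_raises_ok : toys_alt pvRaiseWitness_toys = pvRaiseWitnessOut_toys :=
  toys_raises.2.2.2
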